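-- pv_equiv track=rewrite | github.com/itchono/ESC190-Repo | ESC190 Final/QB2_YINMINGD.py | optimal_sequnce
-- ===== SOURCE A (Python) =====
-- M = 4 # number of rows --> vertical axis
--
-- N = 5 # number of columns --> horizontal axis
--
-- def optimal_sequnce(treasuremap):
--     trace = pathfind_treasure(treasuremap)[1]
--
--     i, j = M-1, N-1
--
--     sequence = []
--
--     while (i, j) != (0, 0):
--         sequence.append(trace[i][j])
--         if trace[i][j] == 0: j -= 1
--         else: i -= 1
--         # reconstruct the path from its trace
--     sequence.reverse()
--     return (sequence)
--
-- def pathfind_treasure(treasuremap):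
--     # memoization approach
--
--     def score(x, y):
--         if cache[y][x] == -1: # Score is not found yet
--             if (x == 0):
--                 cache[y][x] = treasuremap[y][x] + score(x,y-1) - 2
--                 trace[y][x] = 1 # going down
--             elif (y == 0):
--                 cache[y][x] = treasuremap[y][x] + score(x-1, y) - 1
--                 trace[y][x] = 0 # going right
--             else:
--                 cache[y][x] = treasuremap[y][x] + max(score(x, y-1) - 2, score(x-1, y) - 1) # get max of moving right or down, applying move cost
--                 trace[y][x] = (1 if score(x, y-1) - 2 > score(x-1, y) - 1 else 0)
--
--         return cache[y][x]
--
--     cache = [[-1 for i in range(N)] for i in range(M)] # memoization cache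
--     trace = [[-1 for i in range(N)] for i in range(M)] # trace of moves
--
--     # fill in starting corner as base case; that's it
--     cache[0][0] = treasuremap[0][0]
--
--     return score(N-1, M-1), trace, cache
-- ===== SOURCE B (Python) =====
-- M = 4  # number of rows
-- N = 5  # number of columns
--
-- def optimal_sequnce(treasuremap):
--     # Bottom-up tabulation instead of memoized recursion.
--     cache = [[0] * N for _ in range(M)]
--     trace = [[-1] * N for _ in range(M)]
--     cache[0][0] = treasuremap[0][0]
--     for y in range(M):
--         for x in range(N):
--             if y == 0 and x == 0:
--                 continue
--             if x == 0:
--                 cache[y][x] = treasuremap[y][x] + cache[y - 1][x] - 2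
--                 trace[y][x] = 1
--             elif y == 0:
--                 cache[y][x] = treasuremap[y][x] + cache[y][x - 1] - 1
--                 trace[y][x] = 0
--             else:
--                 up = cache[y - 1][x] - 2
--                 left = cache[y][x - 1] - 1
--                 if up > left:
--                     cache[y][x] = treasuremap[y][x] + up
--                     trace[y][x] = 1
--                 else:
--                     cache[y][x] = treasuremap[y][x] + left
--                     trace[y][x] = 0
--     i, j = M - 1, N - 1
--     sequence = []
--     while (i, j) != (0, 0):
--         sequence.append(trace[i][j])
--         if trace[i][j] == 0:
--             j -= 1
--         else:
--             i -= 1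
--     sequence.reverse()
--     return sequence
-- ===== Notes on version B (the rewrite author's own statement) =====
-- stated objective: alternative
-- what changed: Top-down memoized recursion with a -1 sentinel cache is replaced by bottom-up row-major tabulation that fills the cache and trace grids iteratively; the reconstruction walk is kept.
import Mathlib
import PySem

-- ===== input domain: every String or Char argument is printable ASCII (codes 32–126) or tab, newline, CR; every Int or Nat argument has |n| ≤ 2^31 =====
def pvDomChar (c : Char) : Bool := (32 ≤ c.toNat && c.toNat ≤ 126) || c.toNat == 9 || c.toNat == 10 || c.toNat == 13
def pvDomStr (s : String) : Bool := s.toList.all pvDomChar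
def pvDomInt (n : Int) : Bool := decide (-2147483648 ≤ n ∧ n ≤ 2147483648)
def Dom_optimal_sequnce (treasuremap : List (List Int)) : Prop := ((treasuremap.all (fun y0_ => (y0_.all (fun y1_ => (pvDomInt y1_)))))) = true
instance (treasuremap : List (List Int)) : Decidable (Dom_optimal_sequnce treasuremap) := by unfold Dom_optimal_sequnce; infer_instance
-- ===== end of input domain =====

-- B replaces A's top-down memoized recursion (-1 sentinel cache) by bottom-up row-major
-- tabulation of the same 4x5 cache/trace grids; same costs (-2 down, -1 right), same
-- strict '>' tie-break, same reconstruction walk.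

-- ===== PORT A =====
-- 2-d read m[y][x]; exact for the in-range indices reached under Pre_ (the .getD 0
-- default is never read there; where Python raises IndexError, Pre_ excludes the input).
def gget (m : List (List Int)) (y x : Int) : Int :=
  ((PySem.List.pyGet? m y).bind (fun r => PySem.List.pyGet? r x)).getD 0

-- 2-d write m[y][x] = v; exact for the nonnegative in-range indices used under Pre_.
def gset (m : List (List Int)) (y x : Int) (v : Int) : List (List Int) :=
  m.set y.toNat ((m.getD y.toNat []).set x.toNat v)

-- the nested function score(x, y): state = (cache, trace), passed explicitly; the fuel
-- argument only bounds the recursion depth (8 is enough for every call under Pre_).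
def scoreA (tm : List (List Int)) :
    Nat → Int → Int → List (List Int) × List (List Int) →
    Int × (List (List Int) × List (List Int))
  | 0, x, y, st => (gget st.1 y x, st)
  | fuel+1, x, y, st =>
    if gget st.1 y x == -1 then
      if x == 0 then
        let r := scoreA tm fuel x (y-1) st
        let c1 := gset r.2.1 y x (gget tm y x + r.1 - 2)
        let t1 := gset r.2.2 y x 1
        (gget c1 y x, (c1, t1))
      else if y == 0 then
        let r := scoreA tm fuel (x-1) y st
        let c1 := gset r.2.1 y x (gget tm y x + r.1 - 1)
        let t1 := gset r.2.2 y x 0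
        (gget c1 y x, (c1, t1))
      else
        let r1 := scoreA tm fuel x (y-1) st
        let r2 := scoreA tm fuel (x-1) y r1.2
        let c1 := gset r2.2.1 y x (gget tm y x + max (r1.1 - 2) (r2.1 - 1))
        let r3 := scoreA tm fuel x (y-1) (c1, r2.2.2)
        let r4 := scoreA tm fuel (x-1) y r3.2
        let t1 := gset r4.2.2 y x (if r3.1 - 2 > r4.1 - 1 then 1 else 0)
        (gget r4.2.1 y x, (r4.2.1, t1))
    else (gget st.1 y x, st)

def pathfind_treasure (tm : List (List Int)) :
    Int × (List (List Int) × List (List Int)) :=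
  let cache := gset (List.replicate 4 (List.replicate 5 (-1 : Int))) 0 0 (gget tm 0 0)
  let trace := List.replicate 4 (List.replicate 5 (-1 : Int))
  let r := scoreA tm 8 4 3 (cache, trace)
  (r.1, (r.2.2, r.2.1))

-- the reconstruction while-loop; fuel 8 covers the ≤ 7 steps taken under Pre_.
def reconA (trace : List (List Int)) : Nat → Int → Int → List Int → List Int
  | 0, _, _, seq => seq
  | fuel+1, i, j, seq =>
    if i == 0 && j == 0 then seq
    else
      let tv := gget trace i j
      let seq' := seq ++ [tv]
      if tv == 0 then reconA trace fuel i (j-1) seq'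
      else reconA trace fuel (i-1) j seq'

def optimal_sequnce (treasuremap : List (List Int)) : List Int :=
  (reconA (pathfind_treasure treasuremap).2.1 8 3 4 []).reverse

-- ===== PORT B =====
-- Nat-indexed 2-d read/write (B's loop indices are the nonnegative range(4)/range(5) values).
def ggN (m : List (List Int)) (y x : Nat) : Int := (m.getD y []).getD x 0

def gsetN (m : List (List Int)) (y x : Nat) (v : Int) : List (List Int) :=
  m.set y ((m.getD y []).set x v)

-- loop body for cell (y, x)
def stepB (tm : List (List Int)) (st : List (List Int) × List (List Int)) (y x : Nat) :
    List (List Int) × List (List Int) :=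
  if y == 0 && x == 0 then st
  else if x == 0 then
    (gsetN st.1 y x (ggN tm y x + ggN st.1 (y-1) x - 2), gsetN st.2 y x 1)
  else if y == 0 then
    (gsetN st.1 y x (ggN tm y x + ggN st.1 y (x-1) - 1), gsetN st.2 y x 0)
  else
    let up := ggN st.1 (y-1) x - 2
    let left := ggN st.1 y (x-1) - 1
    if up > left then (gsetN st.1 y x (ggN tm y x + up), gsetN st.2 y x 1)
    else (gsetN st.1 y x (ggN tm y x + left), gsetN st.2 y x 0)

-- the two nested for-loops over range(4) x range(5)
def tabB (tm : List (List Int)) : List (List Int) × List (List Int) :=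
  let c0 := gsetN (List.replicate 4 (List.replicate 5 (0 : Int))) 0 0 (ggN tm 0 0)
  let t0 := List.replicate 4 (List.replicate 5 (-1 : Int))
  (List.range 4).foldl
    (fun st y => (List.range 5).foldl (fun st x => stepB tm st y x) st) (c0, t0)

-- B's reconstruction while-loop (same walk as A's, over B's trace grid)
def reconB (trace : List (List Int)) : Nat → Int → Int → List Int → List Int
  | 0, _, _, seq => seq
  | fuel+1, i, j, seq =>
    if i == 0 && j == 0 then seq
    else
      let tv := gget trace i j
      let seq' := seq ++ [tv]
      if tv == 0 then reconB trace fuel i (j-1) seq'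
      else reconB trace fuel (i-1) j seq'

def optimal_sequnce_alt (treasuremap : List (List Int)) : List Int :=
  (reconB (tabB treasuremap).2 8 3 4 []).reverse

-- ===== PRECONDITION & SPEC =====
-- Pre_ excludes exactly the inputs where A raises IndexError: maps without 4 rows of
-- length ≥ 5 (direct out-of-range access), and well-shaped maps whose corner cell is -1
-- (it collides with the memo sentinel and the retry recursion walks off the grid).
def Pre_optimal_sequnce (treasuremap : List (List Int)) : Prop :=
  4 ≤ treasuremap.length ∧ (∀ r ∈ treasuremap.take 4, 5 ≤ r.length) ∧
    (treasuremap.getD 0 []).getD 0 0 ≠ -1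
instance (treasuremap : List (List Int)) : Decidable (Pre_optimal_sequnce treasuremap) := by
  unfold Pre_optimal_sequnce; infer_instance

def pvWitness_optimal_sequnce : List (List Int) :=
  [[1,2,3,4,5],[1,2,3,4,5],[1,2,3,4,5],[1,2,3,4,5]]

def Spec_optimal_sequnce (treasuremap : List (List Int)) (out : List Int) : Prop :=
  out = optimal_sequnce_alt treasuremap
instance (treasuremap : List (List Int)) (out : List Int) :
    Decidable (Spec_optimal_sequnce treasuremap out) := by
  unfold Spec_optimal_sequnce; infer_instance

-- ===== CLAIM (what is proved, stated in full; the proofs are below) =====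
def Claim_equal_optimal_sequnce : Prop := ∀ (treasuremap : List (List Int)),
  Dom_optimal_sequnce treasuremap → Pre_optimal_sequnce treasuremap →
    Spec_optimal_sequnce treasuremap (optimal_sequnce treasuremap)

-- ===== LEMMAS AND PROOFS =====

-- entry (y, x) of the treasure map
def tmv (tm : List (List Int)) (y x : Nat) : Int := (tm.getD y []).getD x 0

-- the optimal score of cell (y, x)
def F (tm : List (List Int)) : Nat → Nat → Int
  | 0, 0 => tmv tm 0 0
  | 0, x+1 => tmv tm 0 (x+1) + F tm 0 x - 1
  | y+1, 0 => tmv tm (y+1) 0 + F tm y 0 - 2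
  | y+1, x+1 => tmv tm (y+1) (x+1) + max (F tm y (x+1) - 2) (F tm (y+1) x - 1)

-- the trace value of cell (y, x) (meaningful for (y, x) ≠ (0, 0))
def T (tm : List (List Int)) : Nat → Nat → Int
  | 0, _ => 0
  | _+1, 0 => 1
  | y+1, x+1 => if F tm y (x+1) - 2 > F tm (y+1) x - 1 then 1 else 0

-- a well-shaped 4×5 working grid
def Sh (m : List (List Int)) : Prop :=
  m.length = 4 ∧ ∀ i, i < 4 → (m.getD i []).length = 5

-- the map shape Pre_ guarantees
def tmOK (tm : List (List Int)) : Prop :=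
  4 ≤ tm.length ∧ ∀ r ∈ tm.take 4, 5 ≤ r.length

lemma getD_set_self {α : Type} (m : List α) (y : Nat) (r d : α) (h : y < m.length) :
    (m.set y r).getD y d = r := by
  simp [List.getD_eq_getElem?_getD, h]

lemma getD_set_ne {α : Type} (m : List α) (i y : Nat) (r d : α) (h : i ≠ y) :
    (m.set y r).getD i d = m.getD i d := by
  simp [List.getD_eq_getElem?_getD, List.getElem?_set_ne (Ne.symm h)]

lemma Sh_gsetN (m : List (List Int)) (y x : Nat) (v : Int) (h : Sh m) (hy : y < 4) :
    Sh (gsetN m y x v) := by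
  obtain ⟨h1, h2⟩ := h
  refine ⟨by simp [gsetN, h1], fun i hi => ?_⟩
  by_cases hiy : i = y
  · subst hiy
    rw [gsetN, getD_set_self _ _ _ _ (by omega), List.length_set]
    exact h2 i hi
  · rw [gsetN, getD_set_ne _ _ _ _ _ hiy]; exact h2 i hi

lemma ggN_gsetN_self (m : List (List Int)) (y x : Nat) (v : Int)
    (h : Sh m) (hy : y < 4) (hx : x < 5) :
    ggN (gsetN m y x v) y x = v := by
  obtain ⟨h1, h2⟩ := h
  rw [ggN, gsetN, getD_set_self _ _ _ _ (by omega),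
    getD_set_self _ _ _ _ (by rw [h2 y hy]; omega)]

lemma ggN_gsetN_ne (m : List (List Int)) (y x y' x' : Nat) (v : Int)
    (h : y' ≠ y ∨ x' ≠ x) :
    ggN (gsetN m y x v) y' x' = ggN m y' x' := by
  rcases h with h | h
  · rw [ggN, gsetN, getD_set_ne _ _ _ _ _ h, ggN]
  · by_cases hy : y' = y
    · subst hy
      by_cases hl : y' < m.length
      · rw [ggN, gsetN, getD_set_self _ _ _ _ hl, getD_set_ne _ _ _ _ _ h, ggN]
      · rw [ggN, gsetN, List.set_eq_of_length_le (by omega), ggN]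
    · rw [ggN, gsetN, getD_set_ne _ _ _ _ _ hy, ggN]

lemma gget_natCast (m : List (List Int)) (y x : Nat)
    (hy : y < m.length) (hx : x < (m.getD y []).length) :
    gget m (↑y) (↑x) = ggN m y x := by
  rw [gget, ggN]
  have hrow : m.getD y [] = m[y] := by
    simp [List.getD_eq_getElem?_getD, List.getElem?_eq_getElem hy]
  rw [hrow] at hx ⊢
  rw [PySem.List.pyGet?_natCast, List.getElem?_eq_getElem hy]
  simp [PySem.List.pyGet?_natCast, List.getD_eq_getElem?_getD,
    List.getElem?_eq_getElem hx]

lemma gget_ggN (m : List (List Int)) (y x : Nat) (h : Sh m) (hy : y < 4) (hx : x < 5) :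
    gget m (↑y) (↑x) = ggN m y x :=
  gget_natCast m y x (by rw [h.1]; omega) (by rw [h.2 y hy]; omega)

lemma gget_tm (tm : List (List Int)) (y x : Nat) (h : tmOK tm) (hy : y < 4) (hx : x < 5) :
    gget tm (↑y) (↑x) = tmv tm y x := by
  have hyl : y < tm.length := by have := h.1; omega
  have hrow : tm.getD y [] ∈ tm.take 4 := by
    have e1 : (tm.take 4)[y]'(by simp; omega) = tm[y] := List.getElem_take
    rw [List.getD_eq_getElem?_getD, List.getElem?_eq_getElem hyl]
    simp only [Option.getD_some]
    rw [← e1]; exact List.getElem_mem _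
  exact gget_natCast tm y x hyl (by have := h.2 _ hrow; omega)

lemma gset_natCast (m : List (List Int)) (y x : Nat) (v : Int) :
    gset m (↑y) (↑x) v = gsetN m y x v := by
  simp [gset, gsetN]

lemma ggN_replicate (v : Int) (y x : Nat) (hy : y < 4) (hx : x < 5) :
    ggN (List.replicate 4 (List.replicate 5 v)) y x = v := by
  interval_cases y <;> interval_cases x <;> rfl

lemma Sh_replicate (v : Int) : Sh (List.replicate 4 (List.replicate 5 v)) := by
  refine ⟨by simp, fun i hi => ?_⟩
  rw [List.getD_eq_getElem?_getD, List.getElem?_replicate]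
  simp [hi]

-- invariant carried through A's memoized recursion, relative to the cone of cell (y, x)
def Hyp (tm : List (List Int)) (y x : Nat) (c t : List (List Int)) : Prop :=
  Sh c ∧ Sh t ∧ ggN c 0 0 = F tm 0 0 ∧ ggN t 0 0 = -1 ∧
  ∀ y' x', y' ≤ y → x' ≤ x → ¬(y' = 0 ∧ x' = 0) →
    (ggN c y' x' = -1 ∨ ggN c y' x' = F tm y' x') ∧
    (ggN c y' x' ≠ -1 → ∀ y'' x'', y'' ≤ y' → x'' ≤ x' → ¬(y'' = 0 ∧ x'' = 0) →
      ggN t y'' x'' = T tm y'' x'')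

-- what one call to score establishes
def Post (tm : List (List Int)) (y x : Nat) (c t c' t' : List (List Int)) : Prop :=
  Sh c' ∧ Sh t' ∧ ggN c' 0 0 = F tm 0 0 ∧ ggN t' 0 0 = -1 ∧
  (∀ y' x', ¬(y' ≤ y ∧ x' ≤ x) → ggN c' y' x' = ggN c y' x' ∧ ggN t' y' x' = ggN t y' x') ∧
  (∀ y' x', y' ≤ y → x' ≤ x →
    (ggN c' y' x' = -1 ∨ ggN c' y' x' = F tm y' x') ∧
    (¬(y' = 0 ∧ x' = 0) → ggN t' y' x' = T tm y' x'))

lemma scoreA_main (tm : List (List Int)) (htm : tmOK tm) (h0 : F tm 0 0 ≠ -1) :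
    ∀ fuel (x y : Nat), x < 5 → y < 4 → x + y < fuel → ∀ c t, Hyp tm y x c t →
    ∃ c' t', scoreA tm fuel (↑x) (↑y) (c, t) = (F tm y x, (c', t')) ∧
      Post tm y x c t c' t' := by
  intro fuel
  induction fuel with
  | zero => intro x y hx hy hf; omega
  | succ fuel ih =>
    intro x y hx hy hf c t hH
    obtain ⟨hShc, hSht, hc00, ht00, hcone⟩ := hH
    by_cases hc : ggN c y x = -1
    · -- the cell must be (re)computed
      have hne00 : ¬(y = 0 ∧ x = 0) := by
        rintro ⟨rfl, rfl⟩; rw [hc00] at hc; exact h0 hc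
      have hcond : (gget c (↑y : Int) (↑x : Int) == -1) = true := by
        rw [gget_ggN c y x hShc hy hx]; simp [hc]
      rcases x with _ | x₀
      · rcases y with _ | y₀
        · exact absurd ⟨rfl, rfl⟩ hne00
        · -- cell (y₀+1, 0): the x == 0 branch
          have hH' : Hyp tm y₀ 0 c t :=
            ⟨hShc, hSht, hc00, ht00, fun a b h1 h2 h3 => hcone a b (by omega) h2 h3⟩
          obtain ⟨c₂, t₂, heq, hShc₂, hSht₂, hc₂00, ht₂00, hfr, hcn⟩ :=
            ih 0 y₀ (by omega) (by omega) (by omega) c t hH'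
          have hv : gget tm (↑(y₀+1) : Int) (↑(0:Nat) : Int) + F tm y₀ 0 - 2 = F tm (y₀+1) 0 := by
            rw [gget_tm tm (y₀+1) 0 htm (by omega) (by omega)]; simp only [F]
          have hcomp : scoreA tm (fuel+1) (↑(0:Nat)) (↑(y₀+1)) (c, t) =
              (F tm (y₀+1) 0, (gsetN c₂ (y₀+1) 0 (F tm (y₀+1) 0), gsetN t₂ (y₀+1) 0 1)) := by
            have ey : ((↑(y₀+1) : Int)) - 1 = (↑y₀ : Int) := by push_cast; ring
            simp only [scoreA]
            rw [if_pos hcond, if_pos (by decide : ((↑(0:Nat) : Int) == 0) = true), ey, heq]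
            dsimp only
            rw [gset_natCast c₂, hv, gset_natCast t₂]
            rw [gget_ggN _ (y₀+1) 0 (Sh_gsetN _ _ _ _ hShc₂ (by omega)) (by omega) (by omega)]
            rw [ggN_gsetN_self _ _ _ _ hShc₂ (by omega) (by omega)]
          refine ⟨_, _, hcomp, Sh_gsetN _ _ _ _ hShc₂ (by omega),
            Sh_gsetN _ _ _ _ hSht₂ (by omega), ?_, ?_, ?_, ?_⟩
          · rw [ggN_gsetN_ne _ _ _ _ _ _ (by omega)]; exact hc₂00
          · rw [ggN_gsetN_ne _ _ _ _ _ _ (by omega)]; exact ht₂00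
          · intro a b hab
            rw [ggN_gsetN_ne _ _ _ _ _ _ (by omega), ggN_gsetN_ne _ _ _ _ _ _ (by omega)]
            exact hfr a b (by omega)
          · intro a b ha hb
            have hb0 : b = 0 := by omega
            subst hb0
            by_cases hay : a = y₀ + 1
            · subst hay
              rw [ggN_gsetN_self _ _ _ _ hShc₂ (by omega) (by omega),
                ggN_gsetN_self _ _ _ _ hSht₂ (by omega) (by omega)]
              exact ⟨Or.inr rfl, fun _ => by simp only [T]⟩
            · rw [ggN_gsetN_ne _ _ _ _ _ _ (by omega), ggN_gsetN_ne _ _ _ _ _ _ (by omega)]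
              exact hcn a 0 (by omega) (by omega)
      · rcases y with _ | y₀
        · -- cell (0, x₀+1): the y == 0 branch
          have hH' : Hyp tm 0 x₀ c t :=
            ⟨hShc, hSht, hc00, ht00, fun a b h1 h2 h3 => hcone a b h1 (by omega) h3⟩
          obtain ⟨c₂, t₂, heq, hShc₂, hSht₂, hc₂00, ht₂00, hfr, hcn⟩ :=
            ih x₀ 0 (by omega) (by omega) (by omega) c t hH'
          have hv : gget tm (↑(0:Nat) : Int) (↑(x₀+1) : Int) + F tm 0 x₀ - 1 = F tm 0 (x₀+1) := by
            rw [gget_tm tm 0 (x₀+1) htm (by omega) (by omega)]; simp only [F]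
          have hcomp : scoreA tm (fuel+1) (↑(x₀+1)) (↑(0:Nat)) (c, t) =
              (F tm 0 (x₀+1), (gsetN c₂ 0 (x₀+1) (F tm 0 (x₀+1)), gsetN t₂ 0 (x₀+1) 0)) := by
            have ex : ((↑(x₀+1) : Int)) - 1 = (↑x₀ : Int) := by push_cast; ring
            have hxne : ¬ ((↑(x₀+1) : Int) == 0) = true := by
              simp only [beq_iff_eq]; push_cast; omega
            simp only [scoreA]
            rw [if_pos hcond, if_neg hxne,
              if_pos (by decide : ((↑(0:Nat) : Int) == 0) = true), ex, heq]
            dsimp only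
            rw [gset_natCast c₂, hv, gset_natCast t₂]
            rw [gget_ggN _ 0 (x₀+1) (Sh_gsetN _ _ _ _ hShc₂ (by omega)) (by omega) (by omega)]
            rw [ggN_gsetN_self _ _ _ _ hShc₂ (by omega) (by omega)]
          refine ⟨_, _, hcomp, Sh_gsetN _ _ _ _ hShc₂ (by omega),
            Sh_gsetN _ _ _ _ hSht₂ (by omega), ?_, ?_, ?_, ?_⟩
          · rw [ggN_gsetN_ne _ _ _ _ _ _ (by omega)]; exact hc₂00
          · rw [ggN_gsetN_ne _ _ _ _ _ _ (by omega)]; exact ht₂00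
          · intro a b hab
            rw [ggN_gsetN_ne _ _ _ _ _ _ (by omega), ggN_gsetN_ne _ _ _ _ _ _ (by omega)]
            exact hfr a b (by omega)
          · intro a b ha hb
            have ha0 : a = 0 := by omega
            subst ha0
            by_cases hbx : b = x₀ + 1
            · subst hbx
              rw [ggN_gsetN_self _ _ _ _ hShc₂ (by omega) (by omega),
                ggN_gsetN_self _ _ _ _ hSht₂ (by omega) (by omega)]
              exact ⟨Or.inr rfl, fun _ => by simp only [T]⟩
            · rw [ggN_gsetN_ne _ _ _ _ _ _ (by omega), ggN_gsetN_ne _ _ _ _ _ _ (by omega)]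
              exact hcn 0 b (by omega) (by omega)
        · -- interior cell (y₀+1, x₀+1)
          have hH1 : Hyp tm y₀ (x₀+1) c t :=
            ⟨hShc, hSht, hc00, ht00, fun a b h1 h2 h3 => hcone a b (by omega) h2 h3⟩
          obtain ⟨c₂, t₂, heq1, hShc₂, hSht₂, hc₂00, ht₂00, hfr1, hcn1⟩ :=
            ih (x₀+1) y₀ (by omega) (by omega) (by omega) c t hH1
          have hH2 : Hyp tm (y₀+1) x₀ c₂ t₂ := by
            refine ⟨hShc₂, hSht₂, hc₂00, ht₂00, fun a b ha hb hab => ?_⟩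
            by_cases hrow : a ≤ y₀
            · refine ⟨(hcn1 a b hrow (by omega)).1, fun _ a' b' ha' hb' hab' => ?_⟩
              exact (hcn1 a' b' (by omega) (by omega)).2 hab'
            · have ha' : a = y₀+1 := by omega
              subst ha'
              rw [(hfr1 (y₀+1) b (by omega)).1]
              refine ⟨(hcone (y₀+1) b le_rfl (by omega) hab).1,
                fun hne a' b' ha' hb' hab' => ?_⟩
              by_cases hin : a' ≤ y₀
              · exact (hcn1 a' b' hin (by omega)).2 hab'
              · have ha'' : a' = y₀+1 := by omega
                subst ha''
                rw [(hfr1 (y₀+1) b' (by omega)).2]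
                exact (hcone (y₀+1) b le_rfl (by omega) hab).2 hne (y₀+1) b' le_rfl hb' hab'
          obtain ⟨c₃, t₃, heq2, hShc₃, hSht₃, hc₃00, ht₃00, hfr2, hcn2⟩ :=
            ih x₀ (y₀+1) (by omega) (by omega) (by omega) c₂ t₂ hH2
          -- after "cache[y][x] = treasuremap[y][x] + max(..., ...)"
          have hH3 : Hyp tm y₀ (x₀+1) (gsetN c₃ (y₀+1) (x₀+1) (F tm (y₀+1) (x₀+1))) t₃ := by
            refine ⟨Sh_gsetN _ _ _ _ hShc₃ (by omega), hSht₃, ?_, ht₃00, fun a b ha hb hab => ?_⟩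
            · rw [ggN_gsetN_ne _ _ _ _ _ _ (by omega)]; exact hc₃00
            · rw [ggN_gsetN_ne _ _ _ _ _ _ (by omega)]
              have hclause1 : ggN c₃ a b = -1 ∨ ggN c₃ a b = F tm a b := by
                by_cases hbx : b ≤ x₀
                · exact (hcn2 a b (by omega) hbx).1
                · have hb' : b = x₀+1 := by omega
                  subst hb'
                  rw [(hfr2 a (x₀+1) (by omega)).1]
                  exact (hcn1 a (x₀+1) ha le_rfl).1
              have ht3T : ∀ a' b', a' ≤ y₀ → b' ≤ x₀+1 → ¬(a' = 0 ∧ b' = 0) →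
                  ggN t₃ a' b' = T tm a' b' := by
                intro a' b' ha' hb' hab'
                by_cases hbx : b' ≤ x₀
                · exact (hcn2 a' b' (by omega) hbx).2 hab'
                · have hb'' : b' = x₀+1 := by omega
                  subst hb''
                  rw [(hfr2 a' (x₀+1) (by omega)).2]
                  exact (hcn1 a' (x₀+1) ha' le_rfl).2 hab'
              exact ⟨hclause1, fun _ a' b' ha' hb' hab' =>
                ht3T a' b' (by omega) (by omega) hab'⟩
          obtain ⟨c₅, t₅, heq3, hShc₅, hSht₅, hc₅00, ht₅00, hfr3, hcn3⟩ :=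
            ih (x₀+1) y₀ (by omega) (by omega) (by omega) _ _ hH3
          have hH4 : Hyp tm (y₀+1) x₀ c₅ t₅ := by
            refine ⟨hShc₅, hSht₅, hc₅00, ht₅00, fun a b ha hb hab => ?_⟩
            have ht5T : ∀ a' b', a' ≤ y₀+1 → b' ≤ x₀ → ¬(a' = 0 ∧ b' = 0) →
                ggN t₅ a' b' = T tm a' b' := by
              intro a' b' ha' hb' hab'
              by_cases hrow : a' ≤ y₀
              · exact (hcn3 a' b' hrow (by omega)).2 hab'
              · have ha'' : a' = y₀+1 := by omega
                subst ha''
                rw [(hfr3 (y₀+1) b' (by omega)).2]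
                exact (hcn2 (y₀+1) b' le_rfl hb').2 hab'
            have hclause1 : ggN c₅ a b = -1 ∨ ggN c₅ a b = F tm a b := by
              by_cases hrow : a ≤ y₀
              · exact (hcn3 a b hrow (by omega)).1
              · have ha'' : a = y₀+1 := by omega
                subst ha''
                rw [(hfr3 (y₀+1) b (by omega)).1,
                  ggN_gsetN_ne _ _ _ _ _ _ (by omega)]
                exact (hcn2 (y₀+1) b le_rfl hb).1
            exact ⟨hclause1, fun _ a' b' ha' hb' hab' => ht5T a' b' (by omega) (by omega) hab'⟩
          obtain ⟨c₆, t₆, heq4, hShc₆, hSht₆, hc₆00, ht₆00, hfr4, hcn4⟩ :=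
            ih x₀ (y₀+1) (by omega) (by omega) (by omega) c₅ t₅ hH4
          -- the value left at the active cell
          have hc₆cell : ggN c₆ (y₀+1) (x₀+1) = F tm (y₀+1) (x₀+1) := by
            rw [(hfr4 (y₀+1) (x₀+1) (by omega)).1, (hfr3 (y₀+1) (x₀+1) (by omega)).1,
              ggN_gsetN_self _ _ _ _ hShc₃ (by omega) (by omega)]
          have hvmax : gget tm (↑(y₀+1) : Int) (↑(x₀+1) : Int) +
              max (F tm y₀ (x₀+1) - 2) (F tm (y₀+1) x₀ - 1) = F tm (y₀+1) (x₀+1) := by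
            rw [gget_tm tm (y₀+1) (x₀+1) htm (by omega) (by omega)]; simp only [F]
          have hwT : (if F tm y₀ (x₀+1) - 2 > F tm (y₀+1) x₀ - 1 then (1:Int) else 0) =
              T tm (y₀+1) (x₀+1) := by simp only [T]
          have hcomp : scoreA tm (fuel+1) (↑(x₀+1)) (↑(y₀+1)) (c, t) =
              (F tm (y₀+1) (x₀+1),
               (c₆, gsetN t₆ (y₀+1) (x₀+1) (T tm (y₀+1) (x₀+1)))) := by
            have ex : ((↑(x₀+1) : Int)) - 1 = (↑x₀ : Int) := by push_cast; ring
            have ey : ((↑(y₀+1) : Int)) - 1 = (↑y₀ : Int) := by push_cast; ring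
            have hxne : ¬ ((↑(x₀+1) : Int) == 0) = true := by
              simp only [beq_iff_eq]; push_cast; omega
            have hyne : ¬ ((↑(y₀+1) : Int) == 0) = true := by
              simp only [beq_iff_eq]; push_cast; omega
            simp only [scoreA]
            rw [if_pos hcond, if_neg hxne, if_neg hyne, ex, ey, heq1]
            dsimp only
            rw [heq2]
            dsimp only
            rw [gset_natCast c₃, hvmax, heq3]
            dsimp only
            rw [heq4]
            dsimp only
            rw [hwT, gset_natCast t₆]
            rw [gget_ggN _ (y₀+1) (x₀+1) hShc₆ (by omega) (by omega), hc₆cell]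
          refine ⟨_, _, hcomp, hShc₆, Sh_gsetN _ _ _ _ hSht₆ (by omega), hc₆00, ?_, ?_, ?_⟩
          · rw [ggN_gsetN_ne _ _ _ _ _ _ (by omega)]; exact ht₆00
          · -- frame
            intro a b hab
            have e4 := hfr4 a b (by omega)
            have e3 := hfr3 a b (by omega)
            have e2 := hfr2 a b (by omega)
            have e1 := hfr1 a b (by omega)
            rw [ggN_gsetN_ne _ _ _ _ _ _ (by omega)]
            rw [e4.1, e4.2, e3.1, e3.2, ggN_gsetN_ne _ _ _ _ _ _ (by omega),
              e2.1, e2.2, e1.1, e1.2]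
            exact ⟨rfl, rfl⟩
          · -- the cone is fully computed
            intro a b ha hb
            by_cases hcell : a = y₀+1 ∧ b = x₀+1
            · obtain ⟨rfl, rfl⟩ := hcell
              rw [ggN_gsetN_self _ _ _ _ hSht₆ (by omega) (by omega)]
              exact ⟨Or.inr hc₆cell, fun _ => rfl⟩
            · rw [ggN_gsetN_ne _ _ _ _ _ _ (by omega)]
              constructor
              · -- cache clause
                by_cases hbx : b ≤ x₀
                · exact (hcn4 a b (by omega) hbx).1
                · have hb' : b = x₀+1 := by omega
                  subst hb'
                  have ha' : a ≤ y₀ := by omega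
                  rw [(hfr4 a (x₀+1) (by omega)).1]
                  exact (hcn3 a (x₀+1) ha' le_rfl).1
              · intro hab
                by_cases hbx : b ≤ x₀
                · exact (hcn4 a b (by omega) hbx).2 hab
                · have hb' : b = x₀+1 := by omega
                  subst hb'
                  have ha' : a ≤ y₀ := by omega
                  rw [(hfr4 a (x₀+1) (by omega)).2]
                  exact (hcn3 a (x₀+1) ha' le_rfl).2 hab
    · -- cache hit: the value is already correct and the whole cone is traced
      have hval : ggN c y x = F tm y x ∧
          (¬(y = 0 ∧ x = 0) → ∀ a b, a ≤ y → b ≤ x → ¬(a = 0 ∧ b = 0) →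
            ggN t a b = T tm a b) := by
        by_cases h00 : y = 0 ∧ x = 0
        · obtain ⟨rfl, rfl⟩ := h00
          exact ⟨hc00, fun h => absurd ⟨rfl, rfl⟩ h⟩
        · obtain ⟨h1, h2⟩ := hcone y x le_rfl le_rfl h00
          refine ⟨h1.resolve_left hc, fun _ => h2 hc⟩
      refine ⟨c, t, ?_, hShc, hSht, hc00, ht00, fun a b _ => ⟨rfl, rfl⟩, ?_⟩
      · have hcond' : (gget c (↑y : Int) (↑x : Int) == -1) = false := by
          rw [gget_ggN c y x hShc hy hx]; simp [hc]
        simp only [scoreA]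
        rw [if_neg (by simp [hcond'])]
        rw [gget_ggN c y x hShc hy hx, hval.1]
      · intro a b ha hb
        constructor
        · by_cases hab : a = 0 ∧ b = 0
          · obtain ⟨rfl, rfl⟩ := hab; exact Or.inr hc00
          · exact (hcone a b ha hb hab).1
        · intro hab
          by_cases h00 : y = 0 ∧ x = 0
          · obtain ⟨rfl, rfl⟩ := h00
            exact absurd ⟨by omega, by omega⟩ hab
          · exact hval.2 h00 a b ha hb hab
-- ----- B's tabulation invariant: k cells processed in row-major order -----
def InvB (tm : List (List Int)) (k : Nat) (st : List (List Int) × List (List Int)) : Prop :=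
  Sh st.1 ∧ Sh st.2 ∧
  (∀ y x, y < 4 → x < 5 → (5*y + x < k ∨ (y = 0 ∧ x = 0)) → ggN st.1 y x = F tm y x) ∧
  (∀ y x, y < 4 → x < 5 →
    ggN st.2 y x = if 5*y + x < k ∧ ¬(y = 0 ∧ x = 0) then T tm y x else -1)

lemma stepB_inv (tm : List (List Int)) (y x : Nat) (hy : y < 4) (hx : x < 5)
    (st : List (List Int) × List (List Int)) (h : InvB tm (5*y + x) st) :
    InvB tm (5*y + x + 1) (stepB tm st y x) := by
  obtain ⟨hc, ht, hcv, htv⟩ := h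
  by_cases h00 : y = 0 ∧ x = 0
  · obtain ⟨rfl, rfl⟩ := h00
    have e : stepB tm st 0 0 = st := by simp [stepB]
    rw [e]
    refine ⟨hc, ht, fun a b ha hb hab => hcv a b ha hb (by omega), fun a b ha hb => ?_⟩
    rw [htv a b ha hb]
    have e1 : ¬(5*a + b < 5*0 + 0 ∧ ¬(a = 0 ∧ b = 0)) := by omega
    have e2 : ¬(5*a + b < 5*0 + 0 + 1 ∧ ¬(a = 0 ∧ b = 0)) := by
      rintro ⟨h3, h4⟩; exact h4 ⟨by omega, by omega⟩
    rw [if_neg e1, if_neg e2]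
  · -- a real cell is filled with its F value and T trace
    have key : stepB tm st y x = (gsetN st.1 y x (F tm y x), gsetN st.2 y x (T tm y x)) := by
      rcases x with _ | x₀
      · rcases y with _ | y₀
        · exact absurd ⟨rfl, rfl⟩ h00
        · have e : stepB tm st (y₀+1) 0 =
              (gsetN st.1 (y₀+1) 0 (ggN tm (y₀+1) 0 + ggN st.1 y₀ 0 - 2),
               gsetN st.2 (y₀+1) 0 1) := by simp [stepB]
          rw [e, hcv y₀ 0 (by omega) (by omega) (by omega)]
          simp only [F, T, ggN, tmv]
      · rcases y with _ | y₀
        · have e : stepB tm st 0 (x₀+1) =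
              (gsetN st.1 0 (x₀+1) (ggN tm 0 (x₀+1) + ggN st.1 0 x₀ - 1),
               gsetN st.2 0 (x₀+1) 0) := by simp [stepB]
          rw [e, hcv 0 x₀ (by omega) (by omega) (by omega)]
          simp only [F, T, ggN, tmv]
        · have hu := hcv y₀ (x₀+1) (by omega) (by omega) (by omega)
          have hl := hcv (y₀+1) x₀ (by omega) (by omega) (by omega)
          have e : stepB tm st (y₀+1) (x₀+1) =
              (if ggN st.1 y₀ (x₀+1) - 2 > ggN st.1 (y₀+1) x₀ - 1 then
                (gsetN st.1 (y₀+1) (x₀+1) (ggN tm (y₀+1) (x₀+1) + (ggN st.1 y₀ (x₀+1) - 2)),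
                 gsetN st.2 (y₀+1) (x₀+1) 1)
               else
                (gsetN st.1 (y₀+1) (x₀+1) (ggN tm (y₀+1) (x₀+1) + (ggN st.1 (y₀+1) x₀ - 1)),
                 gsetN st.2 (y₀+1) (x₀+1) 0)) := by simp [stepB]
          rw [e, hu, hl]
          by_cases hul : F tm y₀ (x₀+1) - 2 > F tm (y₀+1) x₀ - 1
          · rw [if_pos hul]
            have eF : ggN tm (y₀+1) (x₀+1) + (F tm y₀ (x₀+1) - 2) = F tm (y₀+1) (x₀+1) := by
              simp only [F, ggN, tmv]
              rw [max_eq_left (by omega)]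
            have eT : T tm (y₀+1) (x₀+1) = 1 := by
              simp only [T]; rw [if_pos hul]
            rw [eF, eT]
          · rw [if_neg hul]
            have eF : ggN tm (y₀+1) (x₀+1) + (F tm (y₀+1) x₀ - 1) = F tm (y₀+1) (x₀+1) := by
              simp only [F, ggN, tmv]
              rw [max_eq_right (by omega)]
            have eT : T tm (y₀+1) (x₀+1) = 0 := by
              simp only [T]; rw [if_neg hul]
            rw [eF, eT]
    rw [key]
    refine ⟨Sh_gsetN _ _ _ _ hc hy, Sh_gsetN _ _ _ _ ht hy, ?_, ?_⟩
    · intro a b ha hb hab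
      by_cases hsame : a = y ∧ b = x
      · obtain ⟨rfl, rfl⟩ := hsame
        exact ggN_gsetN_self _ _ _ _ hc hy hx
      · rw [ggN_gsetN_ne _ _ _ _ _ _ (by omega)]
        exact hcv a b ha hb (by omega)
    · intro a b ha hb
      by_cases hsame : a = y ∧ b = x
      · obtain ⟨rfl, rfl⟩ := hsame
        rw [ggN_gsetN_self _ _ _ _ ht hy hx]
        have : (5*a + b < 5*a + b + 1 ∧ ¬(a = 0 ∧ b = 0)) := ⟨by omega, h00⟩
        simp [this]
      · rw [ggN_gsetN_ne _ _ _ _ _ _ (by omega), htv a b ha hb]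
        exact if_congr (by omega) rfl rfl

set_option maxRecDepth 4096 in
lemma rowB (tm : List (List Int)) (y : Nat) (hy : y < 4)
    (st : List (List Int) × List (List Int)) (h : InvB tm (5*y) st) :
    InvB tm (5*y + 5) ((List.range 5).foldl (fun st x => stepB tm st y x) st) := by
  have e : (List.range 5).foldl (fun st x => stepB tm st y x) st =
      stepB tm (stepB tm (stepB tm (stepB tm (stepB tm st y 0) y 1) y 2) y 3) y 4 := rfl
  rw [e]
  exact stepB_inv tm y 4 hy (by omega) _
    (stepB_inv tm y 3 hy (by omega) _
      (stepB_inv tm y 2 hy (by omega) _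
        (stepB_inv tm y 1 hy (by omega) _
          (stepB_inv tm y 0 hy (by omega) _ h))))

set_option maxRecDepth 4096 in
set_option maxHeartbeats 1000000 in
lemma tabB_inv (tm : List (List Int)) : InvB tm 20 (tabB tm) := by
  have h0 : InvB tm 0
      (gsetN (List.replicate 4 (List.replicate 5 (0 : Int))) 0 0 (ggN tm 0 0),
       List.replicate 4 (List.replicate 5 (-1 : Int))) := by
    refine ⟨Sh_gsetN _ _ _ _ (Sh_replicate 0) (by omega), Sh_replicate (-1), ?_, ?_⟩
    · intro a b ha hb hab
      have : a = 0 ∧ b = 0 := by omega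
      obtain ⟨rfl, rfl⟩ := this
      rw [ggN_gsetN_self _ _ _ _ (Sh_replicate 0) (by omega) (by omega)]
      simp only [F, ggN, tmv]
    · intro a b ha hb
      rw [ggN_replicate _ _ _ ha hb]
      simp
  have h1 := rowB tm 0 (by omega) _ h0
  have h2 := rowB tm 1 (by omega) _ h1
  have h3 := rowB tm 2 (by omega) _ h2
  have h4 := rowB tm 3 (by omega) _ h3
  have e4 : (List.range 4) = [0, 1, 2, 3] := rfl
  show InvB tm 20 (tabB tm)
  simp only [tabB, e4, List.foldl_cons, List.foldl_nil]
  exact h4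

lemma traceB_char (tm : List (List Int)) :
    Sh (tabB tm).2 ∧ ∀ y x, y < 4 → x < 5 →
      ggN (tabB tm).2 y x = if y = 0 ∧ x = 0 then -1 else T tm y x := by
  obtain ⟨hc, ht, hcv, htv⟩ := tabB_inv tm
  refine ⟨ht, fun y x hy hx => ?_⟩
  rw [htv y x hy hx]
  by_cases h00 : y = 0 ∧ x = 0
  · simp [h00]
  · have : (5*y + x < 20 ∧ ¬(y = 0 ∧ x = 0)) := ⟨by omega, h00⟩
    simp [this]

lemma traceA_char (tm : List (List Int)) (htm : tmOK tm) (h0 : tmv tm 0 0 ≠ -1) :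
    Sh (pathfind_treasure tm).2.1 ∧ ∀ y x, y < 4 → x < 5 →
      ggN (pathfind_treasure tm).2.1 y x = if y = 0 ∧ x = 0 then -1 else T tm y x := by
  have h0' : F tm 0 0 ≠ -1 := by simp only [F]; exact h0
  have hHyp : Hyp tm 3 4
      (gset (List.replicate 4 (List.replicate 5 (-1 : Int))) 0 0 (gget tm 0 0))
      (List.replicate 4 (List.replicate 5 (-1 : Int))) := by
    have e : gset (List.replicate 4 (List.replicate 5 (-1 : Int))) 0 0 (gget tm 0 0) =
        gsetN (List.replicate 4 (List.replicate 5 (-1 : Int))) 0 0 (gget tm 0 0) := rfl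
    rw [e]
    refine ⟨Sh_gsetN _ _ _ _ (Sh_replicate (-1)) (by omega), Sh_replicate (-1), ?_, ?_, ?_⟩
    · rw [ggN_gsetN_self _ _ _ _ (Sh_replicate (-1)) (by omega) (by omega)]
      have : gget tm 0 0 = gget tm (↑(0:Nat)) (↑(0:Nat)) := by norm_num
      rw [this, gget_tm tm 0 0 htm (by omega) (by omega)]
      simp only [F]
    · rw [ggN_replicate _ _ _ (by omega) (by omega)]
    · intro a b ha hb hab
      rw [ggN_gsetN_ne _ _ _ _ _ _ (by omega)]
      refine ⟨Or.inl (ggN_replicate _ _ _ (by omega) (by omega)), fun hne => ?_⟩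
      exact absurd (ggN_replicate (-1) a b (by omega) (by omega)) hne
  obtain ⟨c', t', heq, hSh1, hSh2, hc00, ht00, hfr, hcn⟩ :=
    scoreA_main tm htm h0' 8 4 3 (by omega) (by omega) (by omega) _ _ hHyp
  have e48 : ((4:Nat) : Int) = 4 := by norm_num
  have e3 : ((3:Nat) : Int) = 3 := by norm_num
  rw [e48, e3] at heq
  have epf : (pathfind_treasure tm).2.1 = t' := by
    simp only [pathfind_treasure, heq]
  rw [epf]
  refine ⟨hSh2, fun y x hy hx => ?_⟩
  by_cases h00 : y = 0 ∧ x = 0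
  · obtain ⟨rfl, rfl⟩ := h00
    simp [ht00]
  · rw [(hcn y x (by omega) (by omega)).2 h00]
    simp [h00]

lemma grid_eq (a b : List (List Int)) (ha : Sh a) (hb : Sh b)
    (h : ∀ y x, y < 4 → x < 5 → ggN a y x = ggN b y x) : a = b := by
  apply List.ext_getElem (by rw [ha.1, hb.1])
  intro i h1 h2
  have hi : i < 4 := by have := ha.1; omega
  have ea : a.getD i [] = a[i] := by
    simp [List.getD_eq_getElem?_getD, List.getElem?_eq_getElem h1]
  have eb : b.getD i [] = b[i] := by
    simp [List.getD_eq_getElem?_getD, List.getElem?_eq_getElem h2]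
  apply List.ext_getElem (by rw [← ea, ← eb, ha.2 i hi, hb.2 i hi])
  intro j hj1 hj2
  have hj : j < 5 := by rw [← ea, ha.2 i hi] at hj1; omega
  have := h i j hi hj
  rw [ggN, ggN, ea, eb] at this
  rw [List.getD_eq_getElem?_getD, List.getElem?_eq_getElem hj1] at this
  rw [List.getD_eq_getElem?_getD, List.getElem?_eq_getElem hj2] at this
  simpa using this

lemma recon_eq (tr : List (List Int)) :
    ∀ fuel (i j : Int) (s : List Int), reconA tr fuel i j s = reconB tr fuel i j s := by
  intro fuel
  induction fuel with
  | zero => intro i j s; rfl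
  | succ fuel ih => intro i j s; simp only [reconA, reconB, ih]

-- ===== VERDICT (by name: the statement is the Claim_ definition above) =====
theorem optimal_sequnce_spec : Claim_equal_optimal_sequnce := by
  intro tm hdom hpre
  unfold Spec_optimal_sequnce optimal_sequnce optimal_sequnce_alt
  have htm : tmOK tm := ⟨hpre.1, hpre.2.1⟩
  have h0 : tmv tm 0 0 ≠ -1 := hpre.2.2
  have hA := traceA_char tm htm h0
  have hB := traceB_char tm
  have e : (pathfind_treasure tm).2.1 = (tabB tm).2 :=
    grid_eq _ _ hA.1 hB.1 (fun y x hy hx => by rw [hA.2 y x hy hx, hB.2 y x hy hx])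
  rw [e, recon_eq]
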